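-- pv_equiv track=rewrite | github.com/MarconiGRF/algorithms | exercises/leetcode/1807_bracket_pair_of_strings/1807_bracket_pair_of_strings.py | evaluate
-- ===== SOURCE A (Python) =====
-- from typing import List
--
-- def evaluate(s: str, knowledge: List[List[str]]) -> str:
--     for i in range(len(knowledge)):
--         s = s.replace('(' + knowledge[i][0] + ')', knowledge[i][1])
--
--     i = 0
--     while i < len(s):
--         if s[i] == '(':
--             j = i
--             while s[j] != ')':
--                 s = s[:i] + s[j + 1:]
--             s = s[:i] + '?' + s[j + 1:]
--         i += 1
--
--     return s
-- ===== SOURCE B (Python) =====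
-- def evaluate(s, knowledge):
--     # Build the key->value map once (first entry wins, like A's sequential replaces),
--     # then emit the result in a single left-to-right parse.
--     values = {}
--     for entry in knowledge:
--         values.setdefault(entry[0], entry[1])
--     out = []
--     i = 0
--     n = len(s)
--     while i < n:
--         c = s[i]
--         if c != '(':
--             out.append(c)
--             i += 1
--             continue
--         j = s.find(')', i + 1)
--         if j == -1:
--             out.append('?')   # unclosed bracket
--             i = n
--         else:
--             out.append(values.get(s[i+1:j], '?'))
--             i = j + 1
--     return ''.join(out)
-- ===== Notes on version B (the rewrite author's own statement) =====
-- stated objective: faster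
-- what changed: Instead of one s.replace pass per knowledge entry followed by an index-juggling character-deletion loop, B builds the key->value dict once and emits the answer in a single left-to-right parse of s, looking each bracketed key up in the dict.
-- outside the precondition, e.g. on evaluate('((a))', [['a', 'b'], ['b', 'c']]): A returns 'c', B returns '?)'; on evaluate('(x))', [['x)', 'v']]): A returns 'v', B returns '?)'; on evaluate('(a)', [['a', '()']]): A returns '?', B returns '()'
import Mathlib
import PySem

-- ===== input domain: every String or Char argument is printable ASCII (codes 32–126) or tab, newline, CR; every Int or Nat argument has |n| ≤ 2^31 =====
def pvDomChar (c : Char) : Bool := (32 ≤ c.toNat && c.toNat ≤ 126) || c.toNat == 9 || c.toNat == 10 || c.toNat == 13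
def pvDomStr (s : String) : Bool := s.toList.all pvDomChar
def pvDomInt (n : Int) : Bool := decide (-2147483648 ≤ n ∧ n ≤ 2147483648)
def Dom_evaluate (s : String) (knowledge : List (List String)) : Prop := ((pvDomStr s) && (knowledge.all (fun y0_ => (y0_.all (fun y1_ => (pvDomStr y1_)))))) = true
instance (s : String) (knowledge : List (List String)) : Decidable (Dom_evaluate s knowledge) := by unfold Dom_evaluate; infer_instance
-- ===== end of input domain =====

-- B replaces A's per-entry s.replace passes and index-juggling deletion loop by one dict build plus a
-- single left-to-right parse; equivalence is proved on Pre_evaluate (well-formed knowledge, unnested brackets).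

-- ===== PORT A =====
-- inner while loop of A's second phase: with j = i, 's = s[:i] + s[j+1:]' until s[j] == ')',
-- then 's = s[:i] + "?" + s[j+1:]'.  The loop is run on fuel; Python raises IndexError exactly
-- where s[j] is out of range (PySem.List.pyGet? = none) — those inputs are excluded by Pre_evaluate,
-- and there (and on exhausted fuel, which Pre_ also makes unreachable) the port returns cs unchanged.
def aInner (fuel : Nat) (cs : List Char) (i : Nat) : List Char :=
  match fuel with
  | 0 => cs
  | fuel + 1 =>
    match PySem.List.pyGet? cs (i : Int) with
    | none => cs
    | some c =>
      if c = ')' then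
        PySem.List.slice cs none (some (i : Int)) ++ '?' :: PySem.List.slice cs (some ((i : Int) + 1)) none
      else aInner fuel (PySem.List.slice cs none (some (i : Int)) ++ PySem.List.slice cs (some ((i : Int) + 1)) none) i

-- outer while loop of A's second phase ('while i < len(s)'); fuel = the current length suffices
-- because i grows by one per iteration while the string never grows.
def aOuter (fuel : Nat) (cs : List Char) (i : Nat) : List Char :=
  match fuel with
  | 0 => cs
  | fuel + 1 =>
    if i < cs.length then
      match PySem.List.pyGet? cs (i : Int) with
      | none => cs
      | some c =>
        if c = '(' then aOuter fuel (aInner cs.length (cs) i) (i + 1)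
        else aOuter fuel cs (i + 1)
    else cs

def evaluate (s : String) (knowledge : List (List String)) : String :=
  -- phase 1: for i in range(len(knowledge)): s = s.replace('(' + knowledge[i][0] + ')', knowledge[i][1])
  let cs := knowledge.foldl
    (fun cs e =>
      PySem.Chars.replace cs
        ('(' :: ((PySem.List.pyGetD e 0 "").toList ++ [')']))
        (PySem.List.pyGetD e 1 "").toList)
    s.toList
  -- phase 2: the while loop
  String.ofList (aOuter cs.length cs 0)

-- ===== PORT B =====
-- single left-to-right scan: literal characters are copied, '(key)' becomes values.get(key, '?');
-- 'j = s.find(")", i + 1)' is ported relative to the rest of the string.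
def bScan (values : PySem.Dict String String) (cs : List Char) (acc : List Char) : List Char :=
  match cs with
  | [] => acc
  | c :: rest =>
    if c = '(' then
      let j := PySem.Chars.find rest [')']
      if j = -1 then acc ++ ['?']
      else bScan values (rest.drop (j.toNat + 1))
             (acc ++ (values.getD (String.ofList (rest.take j.toNat)) "?").toList)
    else bScan values rest (acc ++ [c])
termination_by cs.length
decreasing_by
  · simp only [List.length_drop, List.length_cons]; omega
  · simp

def evaluate_alt (s : String) (knowledge : List (List String)) : String :=
  let values := knowledge.foldl
    (fun d e => d.setdefault (PySem.List.pyGetD e 0 "") (PySem.List.pyGetD e 1 "")) PySem.Dict.empty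
  String.ofList (bScan values s.toList [])

-- ===== PRECONDITION & SPEC =====
def parenFreeB (cs : List Char) : Bool := cs.all (fun c => !(c == '(' || c == ')'))

-- bracket shape of s: '(' may only appear when no bracket is open, and every '(' is eventually
-- closed by the next ')' (stray ')' outside a bracket is fine — A skips it).
def altOkAux : List Char → Bool → Bool
  | [], opened => !opened
  | c :: r, opened =>
    if c = '(' then (!opened) && altOkAux r true
    else altOkAux r (opened && !(c = ')'))

-- no '(' is left unclosed: first component = every '(' in the list has a ')' somewhere after it
-- (second component: does the list contain ')' at all)
def noUncAux : List Char → Bool × Bool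
  | [] => (true, false)
  | c :: r =>
    let p := noUncAux r
    ((if c = '(' then p.2 else true) && p.1, p.2 || c = ')')

-- Pre_ excludes knowledge entries with fewer than two fields (A raises IndexError on them), strings in
-- which some '(' is never closed (A's deletion loop runs off the end: IndexError), and the inputs where
-- the two phases of A interact in an accidental way: brackets are admitted either when they do not nest
-- and keys/values are parenthesis-free (the intended shape of the LeetCode problem), or — for arbitrary
-- bracket shapes — when no '(key)' pattern of the knowledge occurs in s, so that the replace phase is the
-- identity.  Outside this, A's sequential-replace cascade yields accidental results (see claim.json cites).
def Pre_evaluate (s : String) (knowledge : List (List String)) : Prop :=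
  knowledge.all (fun e => decide (2 ≤ e.length)) = true ∧
  ((altOkAux s.toList false = true ∧
      knowledge.all (fun e =>
        parenFreeB (PySem.List.pyGetD e 0 "").toList &&
        parenFreeB (PySem.List.pyGetD e 1 "").toList) = true) ∨
   ((noUncAux s.toList).1 = true ∧
      knowledge.all (fun e =>
        !PySem.Chars.isIn ('(' :: ((PySem.List.pyGetD e 0 "").toList ++ [')'])) s.toList) = true))

instance (s : String) (knowledge : List (List String)) : Decidable (Pre_evaluate s knowledge) := by
  unfold Pre_evaluate; infer_instance

def pvWitness_evaluate : String × List (List String) :=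
  ("hi (name), (a) + (b)!", [["name", "bob"], ["a", "1"]])

def Spec_evaluate (s : String) (knowledge : List (List String)) (out : String) : Prop := out = evaluate_alt s knowledge
instance (s : String) (knowledge : List (List String)) (out : String) : Decidable (Spec_evaluate s knowledge out) := by unfold Spec_evaluate; infer_instance

-- ===== CLAIM (what is proved, stated in full; the proofs are below) =====
def Claim_equal_evaluate : Prop := ∀ (s : String) (knowledge : List (List String)), Dom_evaluate s knowledge → Pre_evaluate s knowledge → Spec_evaluate s knowledge (evaluate s knowledge)

-- ===== LEMMAS AND PROOFS =====
def repSpec (old new : List Char) : List Char → List Char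
  | [] => []
  | c :: t =>
    if old.isPrefixOf (c :: t) then new ++ repSpec old new (t.drop (old.length - 1))
    else c :: repSpec old new t
termination_by l => l.length
decreasing_by
  · simp only [List.length_cons]; simp [List.length_drop]
  · simp

theorem go_eq_repSpec (old new : List Char) (hold : old ≠ []) :
    ∀ fuel l acc, l.length ≤ fuel →
      PySem.Chars.replace.go old new fuel l acc = acc.reverse ++ repSpec old new l := by
  intro fuel
  induction fuel with
  | zero =>
    intro l acc h
    have : l = [] := List.eq_nil_of_length_eq_zero (Nat.le_zero.mp h)
    subst this; simp [PySem.Chars.replace.go, repSpec]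
  | succ n ih =>
    intro l acc h
    match l with
    | [] => simp [PySem.Chars.replace.go, repSpec]
    | c :: t =>
      rw [PySem.Chars.replace.go]
      simp only [List.length_cons] at h
      by_cases hp : old.isPrefixOf (c :: t)
      · have hdrop : (c :: t).drop old.length = t.drop (old.length - 1) := by
          cases old with | nil => exact absurd rfl hold | cons a b => simp
        rw [if_pos hp, hdrop, ih _ _ (by simp [List.length_drop]; omega)]
        rw [repSpec, if_pos hp]
        simp
      · rw [if_neg hp, ih _ _ (by omega), repSpec, if_neg hp]
        simp

theorem replace_eq_repSpec (s old new : List Char) (hold : old ≠ []) :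
    PySem.Chars.replace s old new = repSpec old new s := by
  rw [PySem.Chars.replace]
  simp [List.isEmpty_iff, hold]
  exact go_eq_repSpec old new hold s.length s [] (le_refl _)

theorem parenFree_iff (cs : List Char) :
    parenFreeB cs = true ↔ '(' ∉ cs ∧ ')' ∉ cs := by
  simp [parenFreeB, List.all_eq_true]
  constructor
  · intro h; exact ⟨fun hc => (h _ hc).1 rfl, fun hc => (h _ hc).2 rfl⟩
  · rintro ⟨h1, h2⟩ c hc
    exact ⟨fun e => h1 (e ▸ hc), fun e => h2 (e ▸ hc)⟩

inductive PTok where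
  | lit : Char → PTok
  | seg : List Char → PTok

def fromToks : List PTok → List Char
  | [] => []
  | .lit c :: t => c :: fromToks t
  | .seg cs :: t => '(' :: (cs ++ ')' :: fromToks t)

def WFTok : PTok → Prop
  | .lit c => c ≠ '('
  | .seg cs => ')' ∉ cs

-- the stronger invariant of the no-nesting regime: segments also contain no '('
def SegFree (ts : List PTok) : Prop := ∀ cs, PTok.seg cs ∈ ts → '(' ∉ cs

theorem fromToks_append (a b : List PTok) :
    fromToks (a ++ b) = fromToks a ++ fromToks b := by
  induction a with
  | nil => simp [fromToks]
  | cons h t ih => cases h <;> simp [fromToks, ih]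

theorem fromToks_map_lit (v : List Char) : fromToks (v.map .lit) = v := by
  induction v with
  | nil => simp [fromToks]
  | cons c t ih => simp [fromToks, ih]

theorem length_le_fromToks (ts : List PTok) : ts.length ≤ (fromToks ts).length := by
  induction ts with
  | nil => simp [fromToks]
  | cons h t ih => cases h <;> simp [fromToks] <;> omega

-- skipping over '('-free text: the pattern starts with '(' so no occurrence can begin there
theorem repSpec_skip (q v x r : List Char) (hx : '(' ∉ x) :
    repSpec ('(' :: q) v (x ++ r) = x ++ repSpec ('(' :: q) v r := by
  induction x with
  | nil => simp
  | cons c t ih =>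
    have hc : c ≠ '(' := fun e => hx (e ▸ List.mem_cons_self ..)
    rw [List.cons_append, repSpec, if_neg (by simp [List.isPrefixOf]; intro e; exact absurd e.symm hc)]
    rw [ih (fun m => hx (List.mem_cons_of_mem _ m))]; simp

-- a '(key)' pattern matches the front of '(seg)…' iff seg = key (both paren-free)
theorem seg_prefix_iff (k cs r : List Char) (hk : ')' ∉ k) (hcs : ')' ∉ cs) :
    (k ++ [')']).isPrefixOf (cs ++ ')' :: r) = decide (cs = k) := by
  induction k generalizing cs with
  | nil =>
    cases cs with
    | nil => simp [List.isPrefixOf]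
    | cons c t =>
      have hc : c ≠ ')' := fun e => hcs (e ▸ List.mem_cons_self ..)
      simp [List.isPrefixOf]
      intro e; exact absurd e.symm hc
  | cons a k' ih =>
    have ha : a ≠ ')' := fun e => hk (e ▸ List.mem_cons_self ..)
    cases cs with
    | nil => simp [List.isPrefixOf, ha]
    | cons c t =>
      have hct : ')' ∉ t := fun m => hcs (List.mem_cons_of_mem _ m)
      have hk' : ')' ∉ k' := fun m => hk (List.mem_cons_of_mem _ m)
      simp [List.isPrefixOf, ih t hk' hct]
      by_cases e : t = k' <;> simp [e, eq_comm, Bool.beq_eq_decide_eq]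

def stepTok (k v : List Char) : PTok → List PTok
  | .lit c => [.lit c]
  | .seg cs => if cs = k then v.map .lit else [.seg cs]

theorem repSpec_fromToks (k v : List Char) (ts : List PTok)
    (hts : ∀ t ∈ ts, WFTok t) (hseg : SegFree ts) (hk : ')' ∉ k) :
    repSpec ('(' :: (k ++ [')'])) v (fromToks ts) = fromToks (ts.flatMap (stepTok k v)) := by
  induction ts with
  | nil => simp [fromToks, repSpec]
  | cons t rest ih =>
    have hwt := hts t (List.mem_cons_self ..)
    have hrest : ∀ t ∈ rest, WFTok t := fun t m => hts t (List.mem_cons_of_mem _ m)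
    have hsegr : SegFree rest := fun cs m => hseg cs (List.mem_cons_of_mem _ m)
    cases t with
    | lit c =>
      have hc : c ≠ '(' := hwt
      show repSpec _ v (c :: fromToks rest) = _
      rw [repSpec, if_neg (by simp [List.isPrefixOf]; intro e; exact absurd e.symm hc)]
      simp only [List.flatMap_cons, stepTok, fromToks_append]
      rw [ih hrest hsegr]; simp [fromToks]
    | seg cs =>
      have hcs2 : ')' ∉ cs := hwt
      have hcs1 : '(' ∉ cs := hseg cs (List.mem_cons_self ..)
      show repSpec _ v ('(' :: (cs ++ ')' :: fromToks rest)) = _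
      rw [repSpec]
      have hpre : ('(' :: (k ++ [')'])).isPrefixOf ('(' :: (cs ++ ')' :: fromToks rest)) = decide (cs = k) := by
        simp [List.isPrefixOf, seg_prefix_iff k cs _ hk hcs2]
      by_cases e : cs = k
      · rw [if_pos (by simp [e])]
        have hdrop : (cs ++ ')' :: fromToks rest).drop (('(' :: (k ++ [')'])).length - 1) = fromToks rest := by
          subst e
          have h1 : ('(' :: (cs ++ [')'])).length - 1 = (cs ++ [')']).length := by simp
          rw [h1, show cs ++ ')' :: fromToks rest = (cs ++ [')']) ++ fromToks rest by simp]
          exact List.drop_left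
        rw [hdrop, ih hrest hsegr]
        simp only [List.flatMap_cons, stepTok, if_pos e, fromToks_append, fromToks_map_lit]
      · rw [if_neg (by simp [hpre, e])]
        rw [repSpec_skip _ _ _ _ hcs1, repSpec, if_neg (by simp [List.isPrefixOf])]
        rw [ih hrest hsegr]
        simp [List.flatMap_cons, stepTok, e, fromToks]

theorem WF_stepTok (k v : List Char) (hv : '(' ∉ v ∧ ')' ∉ v) (t : PTok) (hw : WFTok t) :
    ∀ u ∈ stepTok k v t, WFTok u := by
  cases t with
  | lit c => intro u hu; simp [stepTok] at hu; subst hu; exact hw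
  | seg cs =>
    intro u hu
    simp only [stepTok] at hu
    split at hu
    · simp at hu
      obtain ⟨c, hc, rfl⟩ := hu
      exact fun e => hv.1 (e ▸ hc)
    · simp at hu; subst hu; exact hw

def lkList : List (List String) → List Char → Option (List Char)
  | [], _ => none
  | e :: t, cs =>
    if (PySem.List.pyGetD e 0 "").toList = cs then some (PySem.List.pyGetD e 1 "").toList
    else lkList t cs

def substTok (kn : List (List String)) : PTok → List PTok
  | .lit c => [.lit c]
  | .seg cs =>
    match lkList kn cs with
    | some v => v.map .lit
    | none => [.seg cs]

def knWF (kn : List (List String)) : Prop :=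
  ∀ e ∈ kn, parenFreeB (PySem.List.pyGetD e 0 "").toList = true ∧
            parenFreeB (PySem.List.pyGetD e 1 "").toList = true

theorem WF_substTok (kn : List (List String)) (hkn : knWF kn) (t : PTok) (hw : WFTok t) :
    ∀ u ∈ substTok kn t, WFTok u := by
  induction kn with
  | nil => cases t <;> (intro u hu; simp [substTok, lkList] at hu; subst hu; exact hw)
  | cons e rest ih =>
    have hrest : knWF rest := fun x m => hkn x (List.mem_cons_of_mem _ m)
    cases t with
    | lit c => intro u hu; simp [substTok] at hu; subst hu; exact hw
    | seg cs =>
      intro u hu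
      by_cases h : (PySem.List.pyGetD e 0 "").toList = cs
      · simp only [substTok, lkList, if_pos h] at hu
        simp at hu
        obtain ⟨c, hc, rfl⟩ := hu
        exact fun ee => ((parenFree_iff _).mp (hkn e (List.mem_cons_self ..)).2).1 (ee ▸ hc)
      · have hsub : substTok (e :: rest) (.seg cs) = substTok rest (.seg cs) := by
          simp only [substTok, lkList, if_neg h]
        rw [hsub] at hu
        exact ih hrest u hu

theorem SegFree_stepTok (k v : List Char) (ts : List PTok) (h : SegFree ts) :
    SegFree (ts.flatMap (stepTok k v)) := by
  intro cs m
  obtain ⟨u, hu, hm⟩ := List.mem_flatMap.mp m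
  cases u with
  | lit c => simp [stepTok] at hm
  | seg cs' =>
    simp only [stepTok] at hm
    split at hm
    · simp at hm
    · simp at hm
      exact hm ▸ h cs' hu

theorem flatMap_subst_nil (ts : List PTok) : ts.flatMap (substTok []) = ts := by
  induction ts with
  | nil => rfl
  | cons t r ih => cases t <;> simp [substTok, lkList, ih]

theorem flatMap_lit_subst (kn : List (List String)) (v : List Char) :
    (v.map PTok.lit).flatMap (substTok kn) = v.map PTok.lit := by
  induction v with
  | nil => simp
  | cons c t ih => simp [substTok, ih]

theorem flatMap_step_subst (kn : List (List String)) (e : List String) (ts : List PTok) :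
    (ts.flatMap (stepTok (PySem.List.pyGetD e 0 "").toList (PySem.List.pyGetD e 1 "").toList)).flatMap (substTok kn)
      = ts.flatMap (substTok (e :: kn)) := by
  rw [List.flatMap_assoc]
  congr 1
  funext t
  cases t with
  | lit c => simp [stepTok, substTok]
  | seg cs =>
    by_cases h : cs = (PySem.List.pyGetD e 0 "").toList
    · simp only [stepTok, if_pos h, flatMap_lit_subst]
      simp [substTok, lkList, h]
    · simp only [stepTok, if_neg h, List.flatMap_cons, List.flatMap_nil, List.append_nil]
      have hl : substTok (e :: kn) (.seg cs) = substTok kn (.seg cs) := by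
        rw [substTok, substTok, lkList, if_neg (fun hh => h hh.symm)]
      rw [hl]

theorem phase1_eq (kn : List (List String)) (hkn : knWF kn) (ts : List PTok)
    (hts : ∀ t ∈ ts, WFTok t) (hseg : SegFree ts) :
    kn.foldl
      (fun cs e => PySem.Chars.replace cs
        ('(' :: ((PySem.List.pyGetD e 0 "").toList ++ [')'])) (PySem.List.pyGetD e 1 "").toList)
      (fromToks ts)
      = fromToks (ts.flatMap (substTok kn)) := by
  induction kn generalizing ts with
  | nil =>
    simp [List.foldl_nil, flatMap_subst_nil]
  | cons e rest ih =>
    have he := hkn e (List.mem_cons_self ..)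
    have hrest : knWF rest := fun x m => hkn x (List.mem_cons_of_mem _ m)
    rw [List.foldl_cons]
    rw [replace_eq_repSpec _ _ _ (by simp)]
    rw [repSpec_fromToks _ _ ts hts hseg ((parenFree_iff _).mp he.1).2]
    rw [ih hrest _ (fun t m => by
      obtain ⟨u, hu, hm⟩ := List.mem_flatMap.mp m
      exact WF_stepTok _ _ (parenFree_iff _|>.mp he.2) u (hts u hu) t hm)
      (SegFree_stepTok _ _ ts hseg)]
    rw [flatMap_step_subst]

def collapse (ts : List PTok) : List Char :=
  ts.flatMap (fun t => match t with | .lit c => [c] | .seg _ => ['?'])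

theorem slice_pre (pre r : List Char) :
    PySem.List.slice (pre ++ r) none (some ((pre.length : Nat) : Int)) = pre := by
  rw [PySem.List.slice_to_natCast]
  exact List.take_left

theorem slice_post (pre r : List Char) (c : Char) :
    PySem.List.slice (pre ++ c :: r) (some (((pre.length : Nat) : Int) + 1)) none = r := by
  have : ((pre.length : Nat) : Int) + 1 = (((pre.length + 1 : Nat)) : Int) := by push_cast; ring
  rw [this, PySem.List.slice_from_natCast]
  rw [show pre ++ c :: r = (pre ++ [c]) ++ r by simp]
  rw [show pre.length + 1 = (pre ++ [c]).length by simp]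
  exact List.drop_left

theorem pyGet_pre (pre r : List Char) (c : Char) :
    PySem.List.pyGet? (pre ++ c :: r) ((pre.length : Nat) : Int) = some c := by
  rw [PySem.List.pyGet?_natCast]
  rw [List.getElem?_append_right (le_refl _)]
  simp

theorem aInner_spec (cs : List Char) (hcs : ')' ∉ cs) :
    ∀ (fuel : Nat) (pre rest : List Char), cs.length + 1 ≤ fuel →
      aInner fuel (pre ++ (cs ++ ')' :: rest)) pre.length = pre ++ '?' :: rest := by
  induction cs with
  | nil =>
    intro fuel pre rest hf
    match fuel, hf with
    | fuel + 1, _ =>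
      rw [aInner]
      simp only [List.nil_append]
      rw [pyGet_pre]
      dsimp only
      rw [if_pos rfl, slice_pre, slice_post]
  | cons c t ih =>
    intro fuel pre rest hf
    have hc : c ≠ ')' := fun e => hcs (e ▸ List.mem_cons_self ..)
    match fuel, hf with
    | fuel + 1, hf1 =>
      rw [aInner]
      rw [show pre ++ ((c :: t) ++ ')' :: rest) = pre ++ c :: (t ++ ')' :: rest) from by simp]
      rw [pyGet_pre]
      dsimp only
      rw [if_neg hc, slice_pre, slice_post]
      exact ih (fun m => hcs (List.mem_cons_of_mem _ m)) fuel pre rest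
        (by simp only [List.length_cons] at hf1; omega)

theorem aOuter_spec (ts : List PTok) (hts : ∀ t ∈ ts, WFTok t) :
    ∀ (fuel : Nat) (pre : List Char), '(' ∉ pre → ts.length ≤ fuel →
      aOuter fuel (pre ++ fromToks ts) pre.length = pre ++ collapse ts := by
  induction ts with
  | nil =>
    intro fuel pre hpre hf
    cases fuel with
    | zero => simp [aOuter, fromToks, collapse]
    | succ f => simp [aOuter, fromToks, collapse]
  | cons t rest ih =>
    intro fuel pre hpre hf
    have hwt := hts t (List.mem_cons_self ..)
    have hrest : ∀ u ∈ rest, WFTok u := fun u m => hts u (List.mem_cons_of_mem _ m)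
    match fuel, hf with
    | f + 1, hf1 =>
      cases t with
      | lit c =>
        have hc : c ≠ '(' := hwt
        rw [aOuter]
        rw [show fromToks (.lit c :: rest) = c :: fromToks rest from rfl]
        rw [if_pos (by simp)]
        rw [pyGet_pre]
        dsimp only
        rw [if_neg hc]
        have := ih hrest f (pre ++ [c])
          (by simp; exact ⟨hpre, fun e => hc e.symm⟩)
          (by simp at hf1 ⊢; omega)
        simp only [List.append_assoc, List.singleton_append, List.length_append,
          List.length_cons, List.length_nil] at this
        rw [show pre.length + 1 = pre.length + (1 + 0) from by omega] at this
        rw [this]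
        simp [collapse]
      | seg cs =>
        have hcs2 : ')' ∉ cs := hwt
        rw [aOuter]
        rw [show fromToks (.seg cs :: rest) = '(' :: (cs ++ ')' :: fromToks rest) from rfl]
        rw [if_pos (by simp)]
        rw [pyGet_pre]
        dsimp only
        rw [if_pos rfl]
        have hinner := aInner_spec ('(' :: cs) (by simp [hcs2]) (pre ++ '(' :: (cs ++ ')' :: fromToks rest)).length pre (fromToks rest) (by simp; omega)
        rw [show pre ++ '(' :: (cs ++ ')' :: fromToks rest) = pre ++ (('(' :: cs) ++ ')' :: fromToks rest) from by simp] at hinner ⊢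
        rw [hinner]
        have := ih hrest f (pre ++ ['?'])
          (by simp; exact hpre)
          (by simp at hf1 ⊢; omega)
        simp only [List.append_assoc, List.singleton_append, List.length_append,
          List.length_cons, List.length_nil] at this
        rw [show pre.length + 1 = pre.length + (1 + 0) from by omega] at this
        rw [this]
        simp [collapse]


theorem find_close (x r : List Char) (hx : ')' ∉ x) :
    PySem.Chars.find (x ++ ')' :: r) [')'] = (x.length : Int) := by
  have hin : [')'] <:+: (x ++ ')' :: r) :=
    (List.singleton_infix_iff _ _).mpr (by simp)
  have h0 : 0 ≤ PySem.Chars.find (x ++ ')' :: r) [')'] :=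
    (PySem.Chars.find_nonneg_iff _ _).mpr hin
  obtain ⟨hprefix, hmin⟩ := PySem.Chars.find_spec h0
  set f := PySem.Chars.find (x ++ ')' :: r) [')'] with hf
  have hle : f.toNat ≤ x.length := by
    by_contra hgt
    exact hmin x.length (by omega) (by simp)
  have hget : (x ++ ')' :: r)[f.toNat]? = some ')' := by
    obtain ⟨t, ht⟩ := hprefix
    rw [← List.head?_drop, ← ht]; simp
  have hge : ¬ f.toNat < x.length := by
    intro hlt
    rw [List.getElem?_append_left hlt, List.getElem?_eq_getElem hlt] at hget
    have : x[f.toNat] = ')' := by simpa using hget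
    exact hx (this ▸ List.getElem_mem hlt)
  omega

theorem bScan_toks (d : PySem.Dict String String) (ts : List PTok) (hts : ∀ t ∈ ts, WFTok t) :
    ∀ acc, bScan d (fromToks ts) acc
      = acc ++ ts.flatMap (fun t => match t with
          | .lit c => [c]
          | .seg cs => (d.getD (String.ofList cs) "?").toList) := by
  induction ts with
  | nil => intro acc; simp [bScan, fromToks]
  | cons t rest ih =>
    have hwt := hts t (List.mem_cons_self ..)
    have hrest : ∀ u ∈ rest, WFTok u := fun u m => hts u (List.mem_cons_of_mem _ m)
    intro acc
    cases t with
    | lit c =>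
      have hc : c ≠ '(' := hwt
      rw [show fromToks (.lit c :: rest) = c :: fromToks rest from rfl, bScan, if_neg hc,
        ih hrest]
      simp
    | seg cs =>
      have hcs2 : ')' ∉ cs := hwt
      rw [show fromToks (.seg cs :: rest) = '(' :: (cs ++ ')' :: fromToks rest) from rfl, bScan,
        if_pos rfl]
      rw [find_close _ _ hcs2]
      rw [if_neg (by omega)]
      rw [show ((cs.length : Int)).toNat = cs.length from by omega]
      rw [List.take_left]
      rw [show (cs ++ ')' :: fromToks rest).drop (cs.length + 1) = fromToks rest from by
        rw [show cs ++ ')' :: fromToks rest = (cs ++ [')']) ++ fromToks rest from by simp,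
          show cs.length + 1 = (cs ++ [')']).length from by simp]
        exact List.drop_left]
      rw [ih hrest]
      simp


def lkStr : List (List String) → String → Option String
  | [], _ => none
  | e :: t, key =>
    if PySem.List.pyGetD e 0 "" = key then some (PySem.List.pyGetD e 1 "")
    else lkStr t key

theorem build_get? (kn : List (List String)) :
    ∀ (d : PySem.Dict String String) (key : String),
      (kn.foldl (fun d e => d.setdefault (PySem.List.pyGetD e 0 "") (PySem.List.pyGetD e 1 "")) d).get? key
        = (d.get? key).or (lkStr kn key) := by
  induction kn with
  | nil => intro d key; simp [lkStr]
  | cons e rest ih =>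
    intro d key
    rw [List.foldl_cons, ih]
    by_cases h : PySem.List.pyGetD e 0 "" = key
    · subst h
      rw [PySem.Dict.get?_setdefault_self]
      rw [lkStr, if_pos rfl]
      cases hd : d.get? (PySem.List.pyGetD e 0 "") <;> simp
    · rw [PySem.Dict.get?_setdefault_of_ne (d := d) (v := PySem.List.pyGetD e 1 "") (fun ee : key = PySem.List.pyGetD e 0 "" => h ee.symm)]
      rw [lkStr, if_neg h]

theorem lk_agree (kn : List (List String)) (cs : List Char) :
    lkList kn cs = (lkStr kn (String.ofList cs)).map String.toList := by
  induction kn with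
  | nil => simp [lkList, lkStr]
  | cons e rest ih =>
    rw [lkList, lkStr]
    by_cases h : (PySem.List.pyGetD e 0 "").toList = cs
    · rw [if_pos h, if_pos (by rw [String.ext_iff, String.toList_ofList]; exact h)]
      simp
    · rw [if_neg h, if_neg (by rw [String.ext_iff, String.toList_ofList]; exact h), ih]

theorem collapse_map_lit (v : List Char) : collapse (v.map .lit) = v := by
  induction v with
  | nil => rfl
  | cons c t ih => simp [collapse] at ih ⊢; exact ih

theorem close_split : ∀ cs : List Char, altOkAux cs true = true →
    ∃ seg r, cs = seg ++ ')' :: r ∧ '(' ∉ seg ∧ ')' ∉ seg ∧ altOkAux r false = true := by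
  intro cs
  induction cs with
  | nil => intro h; simp [altOkAux] at h
  | cons c r ih =>
    intro h
    rw [altOkAux] at h
    by_cases hc : c = '('
    · rw [if_pos hc] at h; simp at h
    · rw [if_neg hc] at h
      by_cases hc2 : c = ')'
      · subst hc2
        exact ⟨[], r, by simpa using h⟩
      · obtain ⟨seg, r', hr, h1, h2, h3⟩ := ih (by simpa [hc2] using h)
        exact ⟨c :: seg, r', by simp [hr],
          by simp [h1]; exact fun e => hc e.symm, by simp [h2]; exact fun e => hc2 e.symm, h3⟩

theorem altOk_toks : ∀ (n : Nat) (cs : List Char), cs.length ≤ n → altOkAux cs false = true →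
    ∃ ts, (∀ t ∈ ts, WFTok t) ∧ SegFree ts ∧ cs = fromToks ts := by
  intro n
  induction n with
  | zero =>
    intro cs h _
    have : cs = [] := List.eq_nil_of_length_eq_zero (Nat.le_zero.mp h)
    exact ⟨[], by simp, by simp [SegFree], by simp [this, fromToks]⟩
  | succ n ih =>
    intro cs hlen hok
    match cs with
    | [] => exact ⟨[], by simp, by simp [SegFree], by simp [fromToks]⟩
    | c :: r =>
      rw [altOkAux] at hok
      by_cases hc : c = '('
      · rw [if_pos hc] at hok
        simp at hok
        obtain ⟨seg, r', rfl, h1, h2, h3⟩ := close_split r hok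
        obtain ⟨ts, hts, hsg, hr⟩ := ih r' (by simp at hlen; omega) h3
        refine ⟨.seg seg :: ts, ?_, ?_, by simp [hc, fromToks, hr]⟩
        · intro t m
          rcases List.mem_cons.mp m with rfl | m
          · exact h2
          · exact hts t m
        · intro cs m
          rcases List.mem_cons.mp m with h' | m
          · cases h'; exact h1
          · exact hsg cs m
      · rw [if_neg hc] at hok
        simp at hok
        obtain ⟨ts, hts, hsg, hr⟩ := ih r (by simp at hlen; omega) hok
        refine ⟨.lit c :: ts, ?_, ?_, by simp [fromToks, hr]⟩
        · intro t m
          rcases List.mem_cons.mp m with rfl | m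
          · exact hc
          · exact hts t m
        · intro cs m
          rcases List.mem_cons.mp m with h' | m
          · simp at h'
          · exact hsg cs m


theorem final_tokens (kn : List (List String)) (ts : List PTok) :
    collapse (ts.flatMap (substTok kn))
      = ts.flatMap (fun t => match t with
          | .lit c => [c]
          | .seg cs =>
            ((kn.foldl (fun d e => d.setdefault (PySem.List.pyGetD e 0 "") (PySem.List.pyGetD e 1 "")) PySem.Dict.empty).getD (String.ofList cs) "?").toList) := by
  rw [collapse, List.flatMap_assoc]
  congr 1
  funext t
  cases t with
  | lit c => simp [substTok]
  | seg cs =>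
    have hget : (kn.foldl (fun d e => d.setdefault (PySem.List.pyGetD e 0 "") (PySem.List.pyGetD e 1 "")) PySem.Dict.empty).getD (String.ofList cs) "?"
        = (lkStr kn (String.ofList cs)).getD "?" := by
      rw [PySem.Dict.getD_eq_get?_getD, build_get?, PySem.Dict.get?_empty]
      simp
    dsimp only
    rw [hget]
    have := lk_agree kn cs
    cases h : lkStr kn (String.ofList cs) with
    | none =>
      rw [h] at this; simp at this
      rw [substTok, this]
      simp
    | some w =>
      rw [h] at this; simp at this
      rw [substTok, this]
      exact collapse_map_lit w.toList


-- ----- the no-pattern regime: phase 1 is the identity and every lookup misses -----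

theorem repSpec_id (old new cs : List Char) (h : ¬ old <:+: cs) :
    repSpec old new cs = cs := by
  induction cs with
  | nil => simp [repSpec]
  | cons c t ih =>
    rw [repSpec, if_neg (fun hp => h (List.IsPrefix.isInfix (List.isPrefixOf_iff_prefix.mp hp)))]
    rw [ih (fun hi => h (hi.trans (List.suffix_cons c t).isInfix))]

theorem phase1_id (kn : List (List String)) (cs : List Char)
    (h : ∀ e ∈ kn, PySem.Chars.isIn ('(' :: ((PySem.List.pyGetD e 0 "").toList ++ [')'])) cs = false) :
    kn.foldl
      (fun cs e => PySem.Chars.replace cs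
        ('(' :: ((PySem.List.pyGetD e 0 "").toList ++ [')'])) (PySem.List.pyGetD e 1 "").toList)
      cs = cs := by
  induction kn with
  | nil => rfl
  | cons e rest ih =>
    rw [List.foldl_cons, replace_eq_repSpec _ _ _ (by simp),
      repSpec_id _ _ _
        ((PySem.Chars.isIn_eq_false_iff _ _).mp (h e (List.mem_cons_self ..)))]
    exact ih (fun e m => h e (List.mem_cons_of_mem _ m))

theorem seg_infix (ts : List PTok) (cs : List Char) (m : PTok.seg cs ∈ ts) :
    ('(' :: (cs ++ [')'])) <:+: fromToks ts := by
  induction ts with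
  | nil => simp at m
  | cons t rest ih =>
    rcases List.mem_cons.mp m with h' | m'
    · subst h'
      refine List.IsPrefix.isInfix ⟨fromToks rest, ?_⟩
      simp [fromToks]
    · have hi := ih m'
      cases t with
      | lit c => exact hi.trans (List.suffix_cons c (fromToks rest)).isInfix
      | seg cs' =>
        refine hi.trans (List.IsSuffix.isInfix ⟨'(' :: (cs' ++ [')']), ?_⟩)
        simp [fromToks]

theorem lkStr_none (kn : List (List String)) (key : String)
    (h : ∀ e ∈ kn, PySem.List.pyGetD e 0 "" ≠ key) : lkStr kn key = none := by
  induction kn with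
  | nil => rfl
  | cons e rest ih =>
    rw [lkStr, if_neg (h e (List.mem_cons_self ..))]
    exact ih (fun e m => h e (List.mem_cons_of_mem _ m))

theorem btok_collapse (d : PySem.Dict String String) (ts : List PTok)
    (h : ∀ cs, PTok.seg cs ∈ ts → d.getD (String.ofList cs) "?" = "?") :
    ts.flatMap (fun t => match t with
        | .lit c => [c]
        | .seg cs => (d.getD (String.ofList cs) "?").toList) = collapse ts := by
  induction ts with
  | nil => rfl
  | cons t rest ih =>
    have ihr := ih (fun cs m => h cs (List.mem_cons_of_mem _ m))
    cases t with
    | lit c => simp [collapse] at ihr ⊢; exact ihr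
    | seg cs =>
      rw [List.flatMap_cons, ihr]
      dsimp only
      rw [h cs (List.mem_cons_self ..)]
      simp [collapse]

theorem noUncAux_snd (cs : List Char) : (noUncAux cs).2 = decide (')' ∈ cs) := by
  induction cs with
  | nil => simp [noUncAux]
  | cons c r ih =>
    rw [noUncAux]
    by_cases hc : c = ')' <;> simp [hc, ih] <;> intro e <;> exact absurd e.symm hc

theorem noUnc_close_split : ∀ (r : List Char), ')' ∈ r →
    ∃ seg r', r = seg ++ ')' :: r' ∧ ')' ∉ seg ∧ ((noUncAux r).1 = true → (noUncAux r').1 = true) := by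
  intro r
  induction r with
  | nil => intro h; simp at h
  | cons c t ih =>
    intro h
    by_cases hc : c = ')'
    · subst hc
      refine ⟨[], t, by simp, by simp, ?_⟩
      rw [noUncAux]
      simp
    · obtain ⟨seg, r', hr, h1, h2⟩ := ih ((List.mem_cons.mp h).resolve_left (fun h' => hc h'.symm))
      refine ⟨c :: seg, r', by simp [hr], by simp [h1]; exact fun e => hc e.symm, ?_⟩
      intro hok
      rw [noUncAux] at hok
      simp only [Bool.and_eq_true] at hok
      exact h2 hok.2

theorem noUnc_toks : ∀ (n : Nat) (cs : List Char), cs.length ≤ n → (noUncAux cs).1 = true →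
    ∃ ts, (∀ t ∈ ts, WFTok t) ∧ cs = fromToks ts := by
  intro n
  induction n with
  | zero =>
    intro cs h _
    have : cs = [] := List.eq_nil_of_length_eq_zero (Nat.le_zero.mp h)
    exact ⟨[], by simp, by simp [this, fromToks]⟩
  | succ n ih =>
    intro cs hlen hok
    match cs with
    | [] => exact ⟨[], by simp, by simp [fromToks]⟩
    | c :: r =>
      rw [noUncAux] at hok
      simp only [Bool.and_eq_true] at hok
      by_cases hc : c = '('
      · subst hc
        rw [if_pos rfl] at hok
        have hmem : ')' ∈ r := by
          have := hok.1
          rw [noUncAux_snd] at this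
          simpa using this
        obtain ⟨seg, r', hr, h1, h2⟩ := noUnc_close_split r hmem
        obtain ⟨ts, hts, hr'⟩ := ih r' (by subst hr; simp at hlen ⊢; omega) (h2 (hr ▸ hok.2))
        refine ⟨.seg seg :: ts, ?_, by simp [fromToks, hr, hr']⟩
        intro t m
        rcases List.mem_cons.mp m with rfl | m
        · exact h1
        · exact hts t m
      · obtain ⟨ts, hts, hr⟩ := ih r (by simp at hlen; omega) hok.2
        refine ⟨.lit c :: ts, ?_, by simp [fromToks, hr]⟩
        intro t m
        rcases List.mem_cons.mp m with rfl | m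
        · exact hc
        · exact hts t m


-- ===== VERDICT (by name: the statement is the Claim_ definition above) =====
theorem evaluate_spec : Claim_equal_evaluate := by
  intro s kn hdom hpre
  unfold Spec_evaluate
  obtain ⟨hlen, hbr⟩ := hpre
  simp only [evaluate, evaluate_alt]
  rcases hbr with ⟨hok, hpf⟩ | ⟨hnu, hno⟩
  · -- no-nesting regime: paren-free knowledge, alternating brackets
    obtain ⟨ts, hts, hsg, hs⟩ := altOk_toks s.toList.length s.toList (le_refl _) hok
    have hknWF : knWF kn := by
      intro e he
      have h := List.all_eq_true.mp hpf e he
      simp only [Bool.and_eq_true] at h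
      exact ⟨h.1, h.2⟩
    rw [hs, phase1_eq kn hknWF ts hts hsg]
    have hwf' : ∀ t ∈ ts.flatMap (substTok kn), WFTok t := by
      intro t m
      obtain ⟨u, hu, hm⟩ := List.mem_flatMap.mp m
      exact WF_substTok kn hknWF u (hts u hu) t hm
    have hA := aOuter_spec (ts.flatMap (substTok kn)) hwf'
      (fromToks (ts.flatMap (substTok kn))).length [] (by simp)
      (length_le_fromToks _)
    simp only [List.nil_append, List.length_nil] at hA
    rw [hA, bScan_toks _ ts hts [], List.nil_append, final_tokens]
  · -- no-pattern regime: phase 1 is the identity and every lookup misses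
    have hno' : ∀ e ∈ kn,
        PySem.Chars.isIn ('(' :: ((PySem.List.pyGetD e 0 "").toList ++ [')'])) s.toList = false := by
      intro e he
      have h := List.all_eq_true.mp hno e he
      simpa using h
    obtain ⟨ts, hts, hs⟩ := noUnc_toks s.toList.length s.toList (le_refl _) hnu
    rw [phase1_id kn s.toList hno', hs]
    have hA := aOuter_spec ts hts (fromToks ts).length [] (by simp) (length_le_fromToks _)
    simp only [List.nil_append, List.length_nil] at hA
    rw [hA, bScan_toks _ ts hts [], List.nil_append]
    rw [btok_collapse]
    intro cs m
    rw [PySem.Dict.getD_eq_get?_getD, build_get?, PySem.Dict.get?_empty]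
    rw [lkStr_none kn (String.ofList cs) ?_]
    · rfl
    · intro e he heq
      have hinf := seg_infix ts cs m
      rw [← hs] at hinf
      have : (PySem.List.pyGetD e 0 "").toList = cs := by
        rw [heq, String.toList_ofList]
      rw [← this] at hinf
      have := (PySem.Chars.isIn_iff_infix _ _).mpr hinf
      rw [hno' e he] at this
      exact Bool.false_ne_true this
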